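-- pv_equiv track=rewrite | github.com/Borgerod/leetcode_submissions | problems/completed/167_two_sum_ii_input_array_is_sorted/two_sum_ii_input_array_is_sorted.py | listCompressor
-- ===== SOURCE A (Python) =====
-- def listCompressor(numbers:list[int]) -> list[int]:
--         _numbers = numbers.copy()
--         compressed_list = []
--         limit = 0
--         while limit < 2:
--             limit += 1
--             for i in sorted(set(_numbers)):
--                 if i in _numbers:
--                     _numbers.remove(i)
--                     compressed_list.append(i)
--             if limit == 2:
--                 break
--         return compressed_list
-- ===== SOURCE B (Python) =====
-- def listCompressor(numbers: list[int]) -> list[int]: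
--     counts = {}
--     for x in numbers:
--         counts[x] = counts.get(x, 0) + 1
--     u = sorted(counts)
--     return u + [v for v in u if counts.get(v, 0) >= 2]
-- ===== Notes on version B (the rewrite author's own statement) =====
-- stated objective: faster
-- what changed: B replaces A's two destructive passes (each building sorted(set(_numbers)) and removing one occurrence per value with linear-time 'in'/remove scans) by one hash-counting pass over the input, one sort of the distinct values, and a filter keeping values with count >= 2.
import Mathlib
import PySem

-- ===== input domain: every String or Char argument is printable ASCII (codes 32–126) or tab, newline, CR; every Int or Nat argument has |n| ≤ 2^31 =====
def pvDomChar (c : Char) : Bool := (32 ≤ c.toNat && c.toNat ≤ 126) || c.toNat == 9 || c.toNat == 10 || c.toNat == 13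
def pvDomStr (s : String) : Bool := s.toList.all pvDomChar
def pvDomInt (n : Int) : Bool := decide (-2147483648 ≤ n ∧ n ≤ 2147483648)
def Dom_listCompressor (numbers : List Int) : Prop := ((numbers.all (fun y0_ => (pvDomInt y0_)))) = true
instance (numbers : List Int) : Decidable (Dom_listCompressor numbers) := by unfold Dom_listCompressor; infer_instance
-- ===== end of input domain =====

-- B counts occurrences in one dict pass, sorts the distinct values once and filters for duplicates,
-- replacing A's two destructive scan-and-remove passes (equivalence is about the return value; neither
-- program mutates its argument — A works on a copy).

-- ===== PORT A =====
-- one 'for i in sorted(set(_numbers)): if i in _numbers: _numbers.remove(i); compressed_list.append(i)'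
-- pass over the state (_numbers, compressed_list)
def listCompressorPass (st : List Int × List Int) : List Int × List Int :=
  (PySem.List.sorted (PySem.Set.ofList st.1) (fun x => x) false).foldl
    (fun st i =>
      if st.1.contains i then
        ((PySem.List.remove? st.1 i).getD st.1, st.2 ++ [i])  -- guard makes remove? succeed
      else st) st

-- the 'while limit < 2: limit += 1; <pass>; if limit == 2: break' loop
def listCompressorLoop (limit : Nat) (st : List Int × List Int) : List Int :=
  if _h : limit < 2 then
    let limit' := limit + 1
    let st' := listCompressorPass st
    if limit' == 2 then st'.2 else listCompressorLoop limit' st'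
  else st.2
termination_by 2 - limit

def listCompressor (numbers : List Int) : List Int :=
  listCompressorLoop 0 (numbers, [])

-- ===== PORT B =====
def listCompressor_alt (numbers : List Int) : List Int :=
  let counts := numbers.foldl (fun d x => d.insert x (d.getD x 0 + 1)) (PySem.Dict.empty : PySem.Dict Int Int)
  let u := PySem.List.sorted counts.keys (fun x => x) false
  u ++ u.filter (fun v => decide ((2 : Int) ≤ counts.getD v 0))

-- ===== PRECONDITION & SPEC =====
def Spec_listCompressor (numbers : List Int) (out : List Int) : Prop := out = listCompressor_alt numbers
instance (numbers : List Int) (out : List Int) : Decidable (Spec_listCompressor numbers out) := by unfold Spec_listCompressor; infer_instance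

-- ===== CLAIM (what is proved, stated in full; the proofs are below) =====
def Claim_equal_listCompressor : Prop := ∀ (numbers : List Int), Dom_listCompressor numbers → Spec_listCompressor numbers (listCompressor numbers)

-- ===== LEMMAS AND PROOFS =====

-- A's inner for-loop over a duplicate-free order whose elements are all present:
-- every guard fires, so it erases each order element once and appends the whole order.
lemma pass_fold (order : List Int) : ∀ (ns comp : List Int), order.Nodup → (∀ i ∈ order, i ∈ ns) →
    order.foldl (fun st i =>
        if st.1.contains i then ((PySem.List.remove? st.1 i).getD st.1, st.2 ++ [i]) else st)
      (ns, comp)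
      = (order.foldl (fun ns i => ns.erase i) ns, comp ++ order) := by
  induction order with
  | nil => simp
  | cons i rest ih =>
    intro ns comp hnd hmem
    have hi : i ∈ ns := hmem i (by simp)
    have hstep : (if ns.contains i then ((PySem.List.remove? ns i).getD ns, comp ++ [i]) else (ns, comp))
        = (ns.erase i, comp ++ [i]) := by
      simp [hi, PySem.List.remove?_eq_some_erase ns i hi]
    simp only [List.foldl_cons, hstep]
    rw [ih (ns.erase i) (comp ++ [i]) hnd.of_cons]
    · simp
    · intro j hj
      have hii : i ∉ rest := (List.nodup_cons.1 hnd).1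
      have hne : j ≠ i := by rintro rfl; exact hii hj
      exact (List.mem_erase_of_ne hne).2 (hmem j (by simp [hj]))

-- erasing each element of a duplicate-free order once decrements exactly the counts of its members
lemma count_foldl_erase (order : List Int) : ∀ (ns : List Int) (v : Int), order.Nodup →
    (order.foldl (fun ns i => ns.erase i) ns).count v
      = ns.count v - (if v ∈ order then 1 else 0) := by
  induction order with
  | nil => simp
  | cons i rest ih =>
    intro ns v hnd
    simp only [List.foldl_cons]
    rw [ih (ns.erase i) v hnd.of_cons, List.count_erase]
    by_cases hvi : v = i
    · subst hvi
      have : v ∉ rest := (List.nodup_cons.1 hnd).1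
      simp [this]
    · simp [hvi, Ne.symm hvi, beq_iff_eq]

lemma nodup_sorted_ofList (xs : List Int) :
    (PySem.List.sorted (PySem.Set.ofList xs) (fun x => x) false).Nodup :=
  (PySem.List.sorted_perm _ _ _).symm.nodup (PySem.Set.nodup_ofList xs)

lemma mem_sorted_ofList (xs : List Int) (v : Int) :
    v ∈ PySem.List.sorted (PySem.Set.ofList xs) (fun x => x) false ↔ v ∈ xs := by
  rw [(PySem.List.sorted_perm _ _ _).mem_iff, PySem.Set.mem_ofList]

lemma pairwise_lt_sorted_ofList (xs : List Int) :
    (PySem.List.sorted (PySem.Set.ofList xs) (fun x => x) false).Pairwise (· < ·) := by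
  have h1 := PySem.List.sorted_pairwise (PySem.Set.ofList xs) (fun x : Int => x)
  have h2 := nodup_sorted_ofList xs
  exact (h1.and h2).imp (fun {a b} h => lt_of_le_of_ne h.1 h.2)

-- the remainder after A's first pass: membership = "occurs at least twice in the input"
lemma mem_remainder (numbers : List Int) (v : Int) :
    v ∈ ((PySem.List.sorted (PySem.Set.ofList numbers) (fun x => x) false).foldl
          (fun ns i => ns.erase i) numbers)
      ↔ 2 ≤ numbers.count v := by
  rw [← List.count_pos_iff,
      count_foldl_erase _ numbers v (nodup_sorted_ofList numbers)]
  by_cases hv : v ∈ numbers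
  · have : 1 ≤ numbers.count v := List.count_pos_iff.2 hv
    rw [if_pos ((mem_sorted_ofList numbers v).2 hv)]
    omega
  · have : numbers.count v = 0 := List.count_eq_zero.2 hv
    simp [hv, this]

-- ===== VERDICT (by name: the statement is the Claim_ definition above) =====
theorem listCompressor_spec : Claim_equal_listCompressor := by
  intro numbers _
  unfold Spec_listCompressor
  -- unroll A's while loop: exactly two passes
  show listCompressorLoop 0 (numbers, []) = _
  rw [listCompressorLoop]
  norm_num
  rw [listCompressorLoop]
  norm_num
  -- name the first pass's order o1 and remainder ns1
  set o1 := PySem.List.sorted (PySem.Set.ofList numbers) (fun x : Int => x) false with ho1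
  have hpass1 : listCompressorPass (numbers, []) =
      (o1.foldl (fun ns i => ns.erase i) numbers, [] ++ o1) := by
    unfold listCompressorPass
    exact pass_fold o1 numbers [] (nodup_sorted_ofList numbers)
      (fun i hi => (mem_sorted_ofList numbers i).1 hi)
  set ns1 := o1.foldl (fun ns i => ns.erase i) numbers with hns1
  set o2 := PySem.List.sorted (PySem.Set.ofList ns1) (fun x : Int => x) false with ho2
  have hpass2 : listCompressorPass (ns1, [] ++ o1) =
      (o2.foldl (fun ns i => ns.erase i) ns1, ([] ++ o1) ++ o2) := by
    unfold listCompressorPass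
    exact pass_fold o2 ns1 ([] ++ o1) (nodup_sorted_ofList ns1)
      (fun i hi => (mem_sorted_ofList ns1 i).1 hi)
  rw [hpass1, hpass2]
  -- B's side: the dict's getD is the count, its keys are set(numbers)
  simp only [listCompressor_alt]
  have hgetD : ∀ v : Int,
      (numbers.foldl (fun d x => d.insert x (d.getD x 0 + 1)) (PySem.Dict.empty : PySem.Dict Int Int)).getD v 0
        = (numbers.count v : Int) := by
    intro v
    rw [PySem.Dict.getD_foldl_insert_add_one]
    simp [PySem.Dict.getD_empty]
  have hkeys : (numbers.foldl (fun d x => d.insert x (d.getD x 0 + 1)) (PySem.Dict.empty : PySem.Dict Int Int)).keys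
      = PySem.Set.ofList numbers := by
    rw [PySem.Dict.keys_foldl_insert]
    rfl
  simp only [hgetD]
  -- it remains to identify the second pass's order with B's filter
  have hfilter : o2 = o1.filter (fun v => decide ((2 : Int) ≤ (numbers.count v : Int))) := by
    apply PySem.List.sorted_eq_of_perm_of_pairwise_lt
    · rw [List.perm_ext_iff_of_nodup
        ((nodup_sorted_ofList numbers).filter _) (PySem.Set.nodup_ofList ns1)]
      intro v
      rw [List.mem_filter, PySem.Set.mem_ofList, hns1, mem_remainder, mem_sorted_ofList]
      constructor
      · intro h
        have := of_decide_eq_true h.2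
        omega
      · intro h
        refine ⟨List.count_pos_iff.1 (by omega), decide_eq_true (by exact_mod_cast h)⟩
    · exact (pairwise_lt_sorted_ofList numbers).filter _
  rw [hfilter, hkeys]
  simp
  rw [← ho1]
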